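-- pv_equiv track=rewrite | github.com/Tomeek8/AoC-2024 | 08/08_day.py | get_antinode_positions
-- ===== SOURCE A (Python) =====
-- def is_inside(position, r_max, c_max):
--     r, c = position
--     return 0 <= r < r_max and 0 <= c < c_max
--
-- def antinode_generator(pos1, pos2):
--     vector = (pos2[0] - pos1[0], pos2[1] - pos1[1])
--     while True:
--         antinode_position = (pos2[0] + vector[0], pos2[1] + vector[1])
--         yield antinode_position
--         pos2 = antinode_position
--
-- def get_antinode_positions(pos1, pos2, r_max, c_max, multinodes_allowed=False):
--     antinodes = set()
--     gen1 = antinode_generator(pos1, pos2)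
--     gen2 = antinode_generator(pos2, pos1)
--     if not multinodes_allowed:
--         an1 = next(gen1)
--         an2 = next(gen2)
--         if is_inside(an1, r_max, c_max):
--             antinodes.add(an1)
--         if is_inside(an2, r_max, c_max):
--             antinodes.add(an2)
--         return antinodes
--     while True:
--         an1 = next(gen1)
--         if is_inside(an1, r_max, c_max):
--             antinodes.add(an1)
--         else:
--             break
--     while True:
--         an2 = next(gen2)
--         if is_inside(an2, r_max, c_max):
--             antinodes.add(an2)
--         else:
--             break
--     return antinodes
-- ===== SOURCE B (Python) =====
-- def get_antinode_positions(pos1, pos2, r_max, c_max, multinodes_allowed=False):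
--     antinodes = set()
--     (r1, c1), (r2, c2) = pos1, pos2
--     for (br, bc), (vr, vc) in (((r2, c2), (r2 - r1, c2 - c1)),
--                                ((r1, c1), (r1 - r2, c1 - c2))):
--         if not (0 <= br + vr < r_max and 0 <= bc + vc < c_max):
--             continue
--         if not multinodes_allowed:
--             K = 1
--         else:
--             # closed form: largest K such that base + k*vec stays in the grid for k = 1..K
--             K = None
--             for b, v, lim in ((br, vr, r_max), (bc, vc, c_max)):
--                 if v > 0:
--                     bound = (lim - 1 - b) // v
--                 elif v < 0:
--                     bound = b // -v
--                 else:
--                     continue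
--                 K = bound if K is None else min(K, bound)
--             if K is None:  # pos1 == pos2 inside the grid: infinitely many antinodes
--                 raise ValueError("coincident antennas with multinodes allowed")
--         antinodes.update((br + k * vr, bc + k * vc) for k in range(1, K + 1))
--     return antinodes
-- ===== Notes on version B (the rewrite author's own statement) =====
-- stated objective: alternative
-- what changed: B replaces A's step-and-probe generator walks (test each successive point until one leaves the grid) by a closed-form computation: for each direction it derives the last valid multiple K via floor division from the grid bounds and emits all points base + k*vec for k in range(1, K+1) in one batch, with no per-point inside test.
import Mathlib
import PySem

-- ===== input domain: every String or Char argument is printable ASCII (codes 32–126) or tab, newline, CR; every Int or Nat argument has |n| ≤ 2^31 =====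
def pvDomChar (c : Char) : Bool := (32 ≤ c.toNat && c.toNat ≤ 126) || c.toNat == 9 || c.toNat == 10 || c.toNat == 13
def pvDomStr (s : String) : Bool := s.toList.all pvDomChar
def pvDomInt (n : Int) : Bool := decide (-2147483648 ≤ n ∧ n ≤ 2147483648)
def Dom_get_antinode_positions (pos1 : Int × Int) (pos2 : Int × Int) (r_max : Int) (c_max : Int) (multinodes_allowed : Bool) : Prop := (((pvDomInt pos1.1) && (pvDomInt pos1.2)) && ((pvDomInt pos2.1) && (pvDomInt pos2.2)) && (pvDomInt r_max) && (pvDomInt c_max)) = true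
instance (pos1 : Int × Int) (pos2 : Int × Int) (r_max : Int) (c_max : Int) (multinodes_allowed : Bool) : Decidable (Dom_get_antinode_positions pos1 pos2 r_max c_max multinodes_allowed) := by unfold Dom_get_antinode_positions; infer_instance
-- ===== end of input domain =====

-- ===== PORT A =====
-- B derives the last in-grid multiple K in closed form by floor division and emits the
-- whole run base + k*vec, k = 1..K, in one batch instead of A's step-and-probe generator
-- walks (objective: alternative).

-- is_inside(position, r_max, c_max)
def pvIsInside (position : Int × Int) (r_max : Int) (c_max : Int) : Bool :=
  decide (0 ≤ position.1) && decide (position.1 < r_max) &&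
  decide (0 ≤ position.2) && decide (position.2 < c_max)

-- A's 'while True: an = next(gen); if inside: add else break' loop, where the generator
-- steps pos2 := pos2 + vector; fuel-bounded (the fuel far exceeds any in-Dom walk length).
def pvWalkA (vector : Int × Int) (r_max c_max : Int) :
    Nat → Int × Int → PySem.Set (Int × Int) → PySem.Set (Int × Int)
  | 0, _, acc => acc
  | fuel + 1, pos, acc =>
      let an : Int × Int := (pos.1 + vector.1, pos.2 + vector.2)
      if pvIsInside an r_max c_max then
        pvWalkA vector r_max c_max fuel an (PySem.Set.add acc an)
      else acc

def pvFuel : Nat := 4294967299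

def get_antinode_positions (pos1 : Int × Int) (pos2 : Int × Int) (r_max : Int) (c_max : Int) (multinodes_allowed : Bool) : List (Int × Int) :=
  let v1 : Int × Int := (pos2.1 - pos1.1, pos2.2 - pos1.2)
  let v2 : Int × Int := (pos1.1 - pos2.1, pos1.2 - pos2.2)
  if multinodes_allowed = false then
    let an1 : Int × Int := (pos2.1 + v1.1, pos2.2 + v1.2)
    let an2 : Int × Int := (pos1.1 + v2.1, pos1.2 + v2.2)
    let acc : PySem.Set (Int × Int) := PySem.Set.empty
    let acc := if pvIsInside an1 r_max c_max then PySem.Set.add acc an1 else acc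
    let acc := if pvIsInside an2 r_max c_max then PySem.Set.add acc an2 else acc
    acc
  else
    let acc := pvWalkA v1 r_max c_max pvFuel pos2 PySem.Set.empty
    pvWalkA v2 r_max c_max pvFuel pos1 acc

-- ===== PORT B =====
-- The inner 'for b, v, lim in …' bound loop of Source B, unrolled over its two iterations;
-- per coordinate: v > 0 → (lim-1-b) // v,  v < 0 → b // -v,  v = 0 → no bound (None).
def pvBoundB (b v lim : Int) : Option Int :=
  if v > 0 then some (PySem.Int.floordiv (lim - 1 - b) v)
  else if v < 0 then some (PySem.Int.floordiv b (-v))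
  else none

-- One iteration of Source B's outer loop over the two (base, vec) orderings.
def pvDirB (base vec : Int × Int) (r_max c_max : Int) (multinodes_allowed : Bool)
    (acc : PySem.Set (Int × Int)) : PySem.Set (Int × Int) :=
  if pvIsInside (base.1 + vec.1, base.2 + vec.2) r_max c_max then
    let K? : Option Int :=
      if multinodes_allowed = false then some 1
      else
        match pvBoundB base.1 vec.1 r_max, pvBoundB base.2 vec.2 c_max with
        | none, none => none
        | some a, none => some a
        | none, some b => some b
        | some a, some b => some (min a b)
    match K? with
    | none => acc     -- Source B raises ValueError here; unreachable inside Pre_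
    | some K =>
        (PySem.List.pyRange 1 (K + 1) 1).foldl
          (fun s k => PySem.Set.add s (base.1 + k * vec.1, base.2 + k * vec.2)) acc
  else acc

def get_antinode_positions_alt (pos1 : Int × Int) (pos2 : Int × Int) (r_max : Int) (c_max : Int) (multinodes_allowed : Bool) : List (Int × Int) :=
  let acc := pvDirB pos2 (pos2.1 - pos1.1, pos2.2 - pos1.2) r_max c_max multinodes_allowed PySem.Set.empty
  pvDirB pos1 (pos1.1 - pos2.1, pos1.2 - pos2.2) r_max c_max multinodes_allowed acc

-- ===== PRECONDITION & SPEC =====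
-- Pre_ excludes only the inputs on which A does not return: with multinodes allowed and
-- pos1 = pos2 lying inside the grid the generator's step vector is (0,0) and A loops forever
-- (B raises ValueError there).
def Pre_get_antinode_positions (pos1 : Int × Int) (pos2 : Int × Int) (r_max : Int) (c_max : Int) (multinodes_allowed : Bool) : Prop :=
  ¬ (multinodes_allowed = true ∧ pos1 = pos2 ∧
     0 ≤ pos2.1 ∧ pos2.1 < r_max ∧ 0 ≤ pos2.2 ∧ pos2.2 < c_max)

instance (pos1 : Int × Int) (pos2 : Int × Int) (r_max : Int) (c_max : Int) (multinodes_allowed : Bool) : Decidable (Pre_get_antinode_positions pos1 pos2 r_max c_max multinodes_allowed) := by unfold Pre_get_antinode_positions; infer_instance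

def pvWitness_get_antinode_positions : (Int × Int) × (Int × Int) × Int × Int × Bool :=
  ((0, 0), (1, 2), 10, 10, true)

def Spec_get_antinode_positions (pos1 : Int × Int) (pos2 : Int × Int) (r_max : Int) (c_max : Int) (multinodes_allowed : Bool) (out : List (Int × Int)) : Prop := out = get_antinode_positions_alt pos1 pos2 r_max c_max multinodes_allowed
instance (pos1 : Int × Int) (pos2 : Int × Int) (r_max : Int) (c_max : Int) (multinodes_allowed : Bool) (out : List (Int × Int)) : Decidable (Spec_get_antinode_positions pos1 pos2 r_max c_max multinodes_allowed out) := by unfold Spec_get_antinode_positions; infer_instance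

-- ===== CLAIM =====
def Claim_equal_get_antinode_positions : Prop := ∀ (pos1 : Int × Int) (pos2 : Int × Int) (r_max : Int) (c_max : Int) (multinodes_allowed : Bool), Dom_get_antinode_positions pos1 pos2 r_max c_max multinodes_allowed → Pre_get_antinode_positions pos1 pos2 r_max c_max multinodes_allowed → Spec_get_antinode_positions pos1 pos2 r_max c_max multinodes_allowed (get_antinode_positions pos1 pos2 r_max c_max multinodes_allowed)

-- ===== LEMMAS AND PROOFS =====

theorem pvWalkA_char (base vec : Int × Int) (r c : Int) :
    ∀ (n : Nat) (fuel : Nat) (s : Int) (acc : PySem.Set (Int × Int)),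
      n + 1 ≤ fuel →
      (∀ j : Int, s + 1 ≤ j → j ≤ s + (n : Int) →
        pvIsInside (base.1 + j * vec.1, base.2 + j * vec.2) r c = true) →
      pvIsInside (base.1 + (s + (n : Int) + 1) * vec.1, base.2 + (s + (n : Int) + 1) * vec.2) r c = false →
      pvWalkA vec r c fuel (base.1 + s * vec.1, base.2 + s * vec.2) acc
        = (PySem.List.pyRange (s + 1) (s + (n : Int) + 1) 1).foldl
            (fun t k => PySem.Set.add t (base.1 + k * vec.1, base.2 + k * vec.2)) acc := by
  intro n
  induction n with
  | zero =>
      intro fuel s acc hfuel _ hout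
      push_cast at hout
      obtain ⟨f, rfl⟩ : ∃ f, fuel = f + 1 := ⟨fuel - 1, by omega⟩
      simp only [pvWalkA]
      have h1 : base.1 + s * vec.1 + vec.1 = base.1 + (s + 1) * vec.1 := by ring
      have h2 : base.2 + s * vec.2 + vec.2 = base.2 + (s + 1) * vec.2 := by ring
      have hout' : pvIsInside (base.1 + (s + 1) * vec.1, base.2 + (s + 1) * vec.2) r c = false := by
        have e : s + 1 = s + 0 + 1 := by ring
        rw [e]; exact_mod_cast hout
      rw [h1, h2, hout']
      rw [PySem.List.pyRange_one_eq_nil (by push_cast; omega)]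
      simp
  | succ n ih =>
      intro fuel s acc hfuel hin hout
      obtain ⟨f, rfl⟩ : ∃ f, fuel = f + 1 := ⟨fuel - 1, by omega⟩
      simp only [pvWalkA]
      have h1 : base.1 + s * vec.1 + vec.1 = base.1 + (s + 1) * vec.1 := by ring
      have h2 : base.2 + s * vec.2 + vec.2 = base.2 + (s + 1) * vec.2 := by ring
      rw [h1, h2]
      have hin1 : pvIsInside (base.1 + (s + 1) * vec.1, base.2 + (s + 1) * vec.2) r c = true :=
        hin (s + 1) le_rfl (by push_cast; omega)
      rw [hin1]
      simp only [if_true]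
      rw [PySem.List.pyRange_one_cons (by push_cast; omega), List.foldl_cons]
      have step := ih f (s + 1) (PySem.Set.add acc (base.1 + (s + 1) * vec.1, base.2 + (s + 1) * vec.2))
        (by omega)
        (by intro j hj1 hjn
            exact hin j (by omega) (by push_cast at hjn ⊢; omega))
        (by have e1 : s + 1 + (n : Int) + 1 = s + ((n : Nat) + 1 : Nat) + 1 := by push_cast; ring
            rw [e1]; exact hout)
      rw [step]
      have e2 : s + 1 + (n : Int) + 1 = s + (((n : Nat) + 1 : Nat) : Int) + 1 := by push_cast; ring
      rw [e2]

theorem pvCoord_char (b v lim : Int) (h0 : 0 ≤ b + v) (h1 : b + v < lim) :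
    (pvBoundB b v lim = none ∧ ∀ k : Int, 1 ≤ k → (0 ≤ b + k * v ∧ b + k * v < lim)) ∨
    (∃ B, pvBoundB b v lim = some B ∧ 1 ≤ B ∧ (B ≤ lim - 1 - b ∨ B ≤ b) ∧
      ∀ k : Int, 1 ≤ k → ((0 ≤ b + k * v ∧ b + k * v < lim) ↔ k ≤ B)) := by
  rcases lt_trichotomy v 0 with hv | hv | hv
  · right
    refine ⟨PySem.Int.floordiv b (-v), ?_, ?_, ?_, ?_⟩
    · simp [pvBoundB, hv, not_lt.mpr (le_of_lt hv)]
    · rw [PySem.Int.le_floordiv_iff_mul_le (by omega)]; omega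
    · right
      have hB1 : 1 ≤ PySem.Int.floordiv b (-v) := by
        rw [PySem.Int.le_floordiv_iff_mul_le (by omega)]; omega
      have hBm : PySem.Int.floordiv b (-v) * (-v) ≤ b :=
        (PySem.Int.le_floordiv_iff_mul_le (by omega)).mp le_rfl
      nlinarith
    · intro k hk
      rw [PySem.Int.le_floordiv_iff_mul_le (by omega)]
      constructor
      · intro h; nlinarith [h.1]
      · intro h
        constructor
        · nlinarith
        · nlinarith [h1, hv, hk]
  · left
    constructor
    · simp [pvBoundB, hv]
    · intro k _; simp [hv]; omega
  · right
    refine ⟨PySem.Int.floordiv (lim - 1 - b) v, ?_, ?_, ?_, ?_⟩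
    · simp [pvBoundB, hv]
    · rw [PySem.Int.le_floordiv_iff_mul_le hv]; omega
    · left
      have hB1 : 1 ≤ PySem.Int.floordiv (lim - 1 - b) v := by
        rw [PySem.Int.le_floordiv_iff_mul_le hv]; omega
      have hBm : PySem.Int.floordiv (lim - 1 - b) v * v ≤ lim - 1 - b :=
        (PySem.Int.le_floordiv_iff_mul_le hv).mp le_rfl
      nlinarith
    · intro k hk
      rw [PySem.Int.le_floordiv_iff_mul_le hv]
      constructor
      · intro h; nlinarith [h.2]
      · intro h
        constructor
        · nlinarith
        · nlinarith

theorem pvDir_eq (base vec : Int × Int) (r c : Int)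
    (hdom : (pvDomInt base.1 && pvDomInt base.2 && pvDomInt r && pvDomInt c) = true)
    (hne : pvIsInside (base.1 + vec.1, base.2 + vec.2) r c = true → vec ≠ (0, 0))
    (acc : PySem.Set (Int × Int)) :
    pvWalkA vec r c pvFuel base acc = pvDirB base vec r c true acc := by
  simp only [pvDomInt, Bool.and_eq_true, decide_eq_true_eq] at hdom
  obtain ⟨⟨⟨hb1, hb2⟩, hr⟩, hc⟩ := hdom
  by_cases hIn : pvIsInside (base.1 + vec.1, base.2 + vec.2) r c = true
  · -- inside at k = 1
    have hIn' := hIn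
    simp only [pvIsInside, Bool.and_eq_true, decide_eq_true_eq] at hIn'
    obtain ⟨⟨⟨g1, g2⟩, g3⟩, g4⟩ := hIn'
    have hvne : vec ≠ (0, 0) := hne hIn
    have c1 := pvCoord_char base.1 vec.1 r g1 g2
    have c2 := pvCoord_char base.2 vec.2 c g3 g4
    -- derive K with its properties
    obtain ⟨K, hK?, hK1, hKcap, hKiff⟩ :
        ∃ K : Int,
          (match pvBoundB base.1 vec.1 r, pvBoundB base.2 vec.2 c with
            | none, none => none
            | some a, none => some a
            | none, some b => some b
            | some a, some b => some (min a b)) = some K ∧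
          1 ≤ K ∧ K ≤ 4294967295 ∧
          (∀ k : Int, 1 ≤ k →
            (pvIsInside (base.1 + k * vec.1, base.2 + k * vec.2) r c = true ↔ k ≤ K)) := by
      rcases c1 with ⟨e1, all1⟩ | ⟨B1, e1, hB11, hB1cap, iff1⟩ <;>
        rcases c2 with ⟨e2, all2⟩ | ⟨B2, e2, hB21, hB2cap, iff2⟩
      · exfalso
        apply hvne
        simp only [pvBoundB] at e1 e2
        have hv1 : vec.1 = 0 := by
          by_contra h
          rcases lt_or_gt_of_ne h with h' | h'
          · rw [if_neg (by omega), if_pos h'] at e1; exact Option.some_ne_none _ e1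
          · rw [if_pos h'] at e1; exact Option.some_ne_none _ e1
        have hv2 : vec.2 = 0 := by
          by_contra h
          rcases lt_or_gt_of_ne h with h' | h'
          · rw [if_neg (by omega), if_pos h'] at e2; exact Option.some_ne_none _ e2
          · rw [if_pos h'] at e2; exact Option.some_ne_none _ e2
        exact Prod.ext hv1 hv2
      · refine ⟨B2, by rw [e1, e2], hB21, by omega, ?_⟩
        intro k hk
        simp only [pvIsInside, Bool.and_eq_true, decide_eq_true_eq]
        have h2 := iff2 k hk
        have h1 := all1 k hk
        constructor
        · rintro ⟨⟨⟨a1, a2⟩, a3⟩, a4⟩; exact h2.mp ⟨a3, a4⟩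
        · intro hkB
          obtain ⟨a3, a4⟩ := h2.mpr hkB
          exact ⟨⟨⟨h1.1, h1.2⟩, a3⟩, a4⟩
      · refine ⟨B1, by rw [e1, e2], hB11, by omega, ?_⟩
        intro k hk
        simp only [pvIsInside, Bool.and_eq_true, decide_eq_true_eq]
        have h1 := iff1 k hk
        have h2 := all2 k hk
        constructor
        · rintro ⟨⟨⟨a1, a2⟩, a3⟩, a4⟩; exact h1.mp ⟨a1, a2⟩
        · intro hkB
          obtain ⟨a1, a2⟩ := h1.mpr hkB
          exact ⟨⟨⟨a1, a2⟩, h2.1⟩, h2.2⟩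
      · refine ⟨min B1 B2, by rw [e1, e2], le_min hB11 hB21, by omega, ?_⟩
        intro k hk
        simp only [pvIsInside, Bool.and_eq_true, decide_eq_true_eq, le_min_iff]
        have h1 := iff1 k hk
        have h2 := iff2 k hk
        constructor
        · rintro ⟨⟨⟨a1, a2⟩, a3⟩, a4⟩; exact ⟨h1.mp ⟨a1, a2⟩, h2.mp ⟨a3, a4⟩⟩
        · rintro ⟨u1, u2⟩
          obtain ⟨a1, a2⟩ := h1.mpr u1
          obtain ⟨a3, a4⟩ := h2.mpr u2
          exact ⟨⟨⟨a1, a2⟩, a3⟩, a4⟩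
    -- B side reduces to the fold over pyRange 1 (K+1) 1
    have hB : pvDirB base vec r c true acc
        = (PySem.List.pyRange 1 (K + 1) 1).foldl
            (fun s k => PySem.Set.add s (base.1 + k * vec.1, base.2 + k * vec.2)) acc := by
      simp only [pvDirB, hIn, if_true]
      rw [hK?]
      norm_num
    rw [hB]
    -- A side via the walk characterization with s = 0, n = K.toNat
    have hKn : ((K.toNat : Nat) : Int) = K := Int.toNat_of_nonneg (by omega)
    have hw := pvWalkA_char base vec r c K.toNat pvFuel 0 acc
      (by have : K.toNat ≤ 4294967295 := by omega
          simp only [pvFuel]; omega)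
      (by intro j hj1 hjn
          rw [zero_add] at hj1
          rw [zero_add, hKn] at hjn
          exact (hKiff j hj1).mpr hjn)
      (by rw [zero_add, hKn]
          have hiff := hKiff (K + 1) (by omega)
          rcases Bool.eq_false_or_eq_true
              (pvIsInside (base.1 + (K + 1) * vec.1, base.2 + (K + 1) * vec.2) r c) with hh | hh
          · exact absurd (hiff.mp hh) (by omega)
          · exact hh)
    simp only [zero_add, hKn, zero_mul, add_zero, Prod.mk.eta] at hw
    exact hw
  · -- not inside at k = 1: both return acc
    have hIn' : pvIsInside (base.1 + vec.1, base.2 + vec.2) r c = false :=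
      Bool.not_eq_true _ ▸ eq_false_of_ne_true hIn
    obtain ⟨f, hf⟩ : ∃ f, pvFuel = f + 1 := ⟨pvFuel - 1, rfl⟩
    rw [hf]
    simp only [pvWalkA, pvDirB, hIn', if_false, Bool.false_eq_true]

theorem pvDirB_false (base vec : Int × Int) (r c : Int) (acc : PySem.Set (Int × Int)) :
    pvDirB base vec r c false acc
      = if pvIsInside (base.1 + vec.1, base.2 + vec.2) r c then
          PySem.Set.add acc (base.1 + vec.1, base.2 + vec.2)
        else acc := by
  simp only [pvDirB]
  split
  · have h2 : PySem.List.pyRange 1 2 1 = [(1 : Int)] := by decide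
    simp [h2]
  · rfl

-- ===== VERDICT =====
theorem get_antinode_positions_spec : Claim_equal_get_antinode_positions := by
  intro pos1 pos2 r c m hdom hpre
  unfold Spec_get_antinode_positions get_antinode_positions get_antinode_positions_alt
  simp only [Dom_get_antinode_positions, Bool.and_eq_true] at hdom
  obtain ⟨⟨⟨⟨d11, d12⟩, d21, d22⟩, dr⟩, dc⟩ := hdom
  unfold Pre_get_antinode_positions at hpre
  cases m with
  | false =>
      simp only [if_true]
      rw [pvDirB_false, pvDirB_false]
  | true =>
      simp only [show (true = false) = False by simp, if_false]
      rw [pvDir_eq pos2 (pos2.1 - pos1.1, pos2.2 - pos1.2) r c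
            (by simp only [Bool.and_eq_true]; exact ⟨⟨⟨d21, d22⟩, dr⟩, dc⟩)
            (by intro hin hveq
                apply hpre
                have h1 : pos2.1 - pos1.1 = 0 := congrArg Prod.fst hveq
                have h2 : pos2.2 - pos1.2 = 0 := congrArg Prod.snd hveq
                simp only [h1, h2, add_zero] at hin
                simp only [pvIsInside, Bool.and_eq_true, decide_eq_true_eq] at hin
                exact ⟨rfl, Prod.ext (by omega) (by omega), hin.1.1.1, hin.1.1.2, hin.1.2, hin.2⟩)]
      rw [pvDir_eq pos1 (pos1.1 - pos2.1, pos1.2 - pos2.2) r c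
            (by simp only [Bool.and_eq_true]; exact ⟨⟨⟨d11, d12⟩, dr⟩, dc⟩)
            (by intro hin hveq
                apply hpre
                have h1 : pos1.1 - pos2.1 = 0 := congrArg Prod.fst hveq
                have h2 : pos1.2 - pos2.2 = 0 := congrArg Prod.snd hveq
                simp only [h1, h2, add_zero] at hin
                simp only [pvIsInside, Bool.and_eq_true, decide_eq_true_eq] at hin
                have hp : pos1 = pos2 := Prod.ext (by omega) (by omega)
                refine ⟨rfl, hp, ?_, ?_, ?_, ?_⟩ <;> rw [← hp] <;> omega)]
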